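-- pv_equiv track=rewrite | github.com/RiEnRiu/rer_learning_code | learn_pycpp/py_modify_order_by_weight.py | _find_min_mod_multicls
-- ===== SOURCE A (Python) =====
-- def _find_min_mod_multicls(index_range, modify_timess, modifications):
--     r_index = []
--     min_modify_times = 10000000
--     min_modification = 10000000
--     for i in index_range:
--         modify_times = modify_timess[i]
--         modification = len(modifications[i])
--         if min_modify_times > modify_times:
--             r_index = [i]
--             min_modify_times = modify_times
--             min_modification = modification
--         elif min_modify_times == modify_times:
--             if min_modification > modification:
--                 r_index = [i]
--                 min_modify_times = modify_times
--                 min_modification = modification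
--             elif min_modification == modification:
--                 r_index.append(i)
--     return r_index
-- ===== SOURCE B (Python) =====
-- def _find_min_mod_multicls(index_range, modify_timess, modifications):
--     best = (10000000, 10000000)
--     for i in index_range:
--         key = (modify_timess[i], len(modifications[i]))
--         if key < best:
--             best = key
--     return [i for i in index_range if (modify_timess[i], len(modifications[i])) == best]
-- ===== Notes on version B (the rewrite author's own statement) =====
-- stated objective: alternative
-- what changed: Replaces the single-pass accumulate-and-reset loop (rebuilding the result list on every new minimum) by a two-phase decomposition: one pass folds the lexicographic minimum key seeded with the same (10000000,10000000) sentinel, then a comprehension collects the indices whose key equals that minimum, preserving order.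
import Mathlib
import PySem

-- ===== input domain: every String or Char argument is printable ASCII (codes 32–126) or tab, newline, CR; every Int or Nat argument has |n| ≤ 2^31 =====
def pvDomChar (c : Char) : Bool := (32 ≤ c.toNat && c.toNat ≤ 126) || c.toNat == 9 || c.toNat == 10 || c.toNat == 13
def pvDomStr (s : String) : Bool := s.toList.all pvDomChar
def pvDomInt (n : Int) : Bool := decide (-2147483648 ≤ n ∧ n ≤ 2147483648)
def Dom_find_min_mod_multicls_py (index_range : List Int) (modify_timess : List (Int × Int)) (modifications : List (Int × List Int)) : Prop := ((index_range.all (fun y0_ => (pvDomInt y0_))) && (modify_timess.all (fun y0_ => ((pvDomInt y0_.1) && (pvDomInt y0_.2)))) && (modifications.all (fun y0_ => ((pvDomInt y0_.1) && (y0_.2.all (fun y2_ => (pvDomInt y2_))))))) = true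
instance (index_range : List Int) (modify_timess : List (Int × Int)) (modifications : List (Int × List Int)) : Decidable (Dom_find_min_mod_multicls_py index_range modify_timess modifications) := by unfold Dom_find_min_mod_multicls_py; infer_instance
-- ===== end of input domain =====

-- B replaces A's accumulate-and-reset loop by a two-phase decomposition (fold the lexicographic
-- minimum key with the same sentinel seed, then filter the indices matching it); objective: alternative.


-- ===== PORT A =====
-- A's loop body as a helper; state = (r_index, min_modify_times, min_modification).
-- 'modify_timess[i]' / 'modifications[i]' are dict lookups; a missing key is a KeyError,
-- excluded by Pre_; '.getD' defaults are never reached under Pre_.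
def pvStepA (d1 : List (Int × Int)) (d2 : List (Int × List Int))
    (st : List Int × Int × Int) (i : Int) : List Int × Int × Int :=
  let modify_times : Int := ((PySem.Dict.mk d1).get? i).getD 0
  let modification : Int := (((PySem.Dict.mk d2).get? i).getD []).length
  if st.2.1 > modify_times then ([i], modify_times, modification)
  else if st.2.1 == modify_times then
    (if st.2.2 > modification then ([i], modify_times, modification)
     else if st.2.2 == modification then (st.1 ++ [i], st.2.1, st.2.2)
     else st)
  else st

def find_min_mod_multicls_py (index_range : List Int) (modify_timess : List (Int × Int)) (modifications : List (Int × List Int)) : List Int :=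
  (index_range.foldl (pvStepA modify_timess modifications) ([], 10000000, 10000000)).1

-- ===== PORT B =====
-- key(i) = (modify_timess[i], len(modifications[i]))
def pvKey (d1 : List (Int × Int)) (d2 : List (Int × List Int)) (i : Int) : Int × Int :=
  (((PySem.Dict.mk d1).get? i).getD 0, ((((PySem.Dict.mk d2).get? i).getD []).length : Int))

-- Python's '<' on int pairs (lexicographic)
def pvLtKey (a b : Int × Int) : Bool := a.1 < b.1 || (a.1 == b.1 && a.2 < b.2)

def find_min_mod_multicls_py_alt (index_range : List Int) (modify_timess : List (Int × Int)) (modifications : List (Int × List Int)) : List Int :=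
  let best := index_range.foldl
    (fun b i => let k := pvKey modify_timess modifications i; if pvLtKey k b then k else b)
    (10000000, 10000000)
  index_range.filter (fun i => pvKey modify_timess modifications i == best)

-- ===== PRECONDITION & SPEC =====
-- Pre_ excludes exactly the inputs where Python raises KeyError: some i in index_range missing
-- from either dict.
def Pre_find_min_mod_multicls_py (index_range : List Int) (modify_timess : List (Int × Int)) (modifications : List (Int × List Int)) : Prop :=
  ∀ i ∈ index_range, ((PySem.Dict.mk modify_timess).get? i).isSome = true ∧ ((PySem.Dict.mk modifications).get? i).isSome = true
instance (index_range : List Int) (modify_timess : List (Int × Int)) (modifications : List (Int × List Int)) : Decidable (Pre_find_min_mod_multicls_py index_range modify_timess modifications) := by unfold Pre_find_min_mod_multicls_py; infer_instance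

def pvWitness_find_min_mod_multicls_py : List Int × (List (Int × Int)) × (List (Int × List Int)) :=
  ([0, 1, 2], [(0, 3), (1, 2), (2, 2)], [(0, [7]), (1, [1, 2]), (2, [5])])

def Spec_find_min_mod_multicls_py (index_range : List Int) (modify_timess : List (Int × Int)) (modifications : List (Int × List Int)) (out : List Int) : Prop := out = find_min_mod_multicls_py_alt index_range modify_timess modifications
instance (index_range : List Int) (modify_timess : List (Int × Int)) (modifications : List (Int × List Int)) (out : List Int) : Decidable (Spec_find_min_mod_multicls_py index_range modify_timess modifications out) := by unfold Spec_find_min_mod_multicls_py; infer_instance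

-- ===== CLAIM (what is proved, stated in full; the proofs are below) =====
def Claim_equal_find_min_mod_multicls_py : Prop := ∀ (index_range : List Int) (modify_timess : List (Int × Int)) (modifications : List (Int × List Int)), Dom_find_min_mod_multicls_py index_range modify_timess modifications → Pre_find_min_mod_multicls_py index_range modify_timess modifications → Spec_find_min_mod_multicls_py index_range modify_timess modifications (find_min_mod_multicls_py index_range modify_timess modifications)

-- ===== LEMMAS AND PROOFS =====

-- B's min-fold step, named for the proofs
def pvStepB (d1 : List (Int × Int)) (d2 : List (Int × List Int)) (b : Int × Int) (i : Int) : Int × Int :=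
  if pvLtKey (pvKey d1 d2 i) b then pvKey d1 d2 i else b

lemma ltKey_iff (a b : Int × Int) : pvLtKey a b = true ↔ (a.1 < b.1 ∨ (a.1 = b.1 ∧ a.2 < b.2)) := by
  simp [pvLtKey]

-- A's step, rephrased through the lexicographic comparison of keys
set_option maxRecDepth 4000 in
lemma stepA_eq (d1 : List (Int × Int)) (d2 : List (Int × List Int)) (r : List Int) (b : Int × Int) (i : Int) :
    pvStepA d1 d2 (r, b) i =
      if pvLtKey (pvKey d1 d2 i) b then ([i], pvKey d1 d2 i)
      else if pvKey d1 d2 i = b then (r ++ [i], b) else (r, b) := by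
  rcases b with ⟨b1, b2⟩
  unfold pvStepA pvLtKey pvKey
  simp only [gt_iff_lt, beq_iff_eq, Bool.or_eq_true, Bool.and_eq_true, decide_eq_true_eq,
    Prod.mk.injEq]
  split_ifs <;> (try subst_vars) <;> first | rfl | omega

-- the folded minimum never exceeds its seed
lemma foldB_le (d1 : List (Int × Int)) (d2 : List (Int × List Int)) :
    ∀ (l : List Int) (b : Int × Int),
      l.foldl (pvStepB d1 d2) b = b ∨ pvLtKey (l.foldl (pvStepB d1 d2) b) b = true := by
  intro l
  induction l with
  | nil => intro b; left; rfl
  | cons i l ih =>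
    intro b
    have h := ih (pvStepB d1 d2 b i)
    simp only [List.foldl_cons]
    unfold pvStepB at h ⊢
    by_cases hk : pvLtKey (pvKey d1 d2 i) b = true
    · simp only [hk, if_true] at h ⊢
      rcases h with h | h
      · right; rw [h]; exact hk
      · right
        rw [ltKey_iff] at h hk ⊢
        omega
    · simp only [hk] at h ⊢
      simpa using h

-- A's fold result = (kept seed prefix) ++ filter by the final minimum
lemma foldA_eq (d1 : List (Int × Int)) (d2 : List (Int × List Int)) :
    ∀ (l : List Int) (r : List Int) (b : Int × Int),
      (l.foldl (pvStepA d1 d2) (r, b)).1 =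
        (if l.foldl (pvStepB d1 d2) b = b then r else []) ++
          l.filter (fun i => pvKey d1 d2 i == l.foldl (pvStepB d1 d2) b) := by
  intro l
  induction l with
  | nil => intro r b; simp
  | cons i l ih =>
    intro r b
    simp only [List.foldl_cons, List.filter_cons, stepA_eq]
    have hB : pvStepB d1 d2 b i = if pvLtKey (pvKey d1 d2 i) b then pvKey d1 d2 i else b := rfl
    by_cases hlt : pvLtKey (pvKey d1 d2 i) b = true
    · simp only [hB, hlt, if_true]
      rw [ih [i]]
      have hne : l.foldl (pvStepB d1 d2) (pvKey d1 d2 i) ≠ b := by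
        rcases foldB_le d1 d2 l (pvKey d1 d2 i) with h | h
        · rw [h]
          intro hkb
          rw [hkb] at hlt
          rw [ltKey_iff] at hlt
          omega
        · intro hbb
          rw [hbb] at h
          rw [ltKey_iff] at h hlt
          omega
      by_cases hkeq : l.foldl (pvStepB d1 d2) (pvKey d1 d2 i) = pvKey d1 d2 i
      · rw [if_neg hne]
        simp [hkeq]
      · have hf : (pvKey d1 d2 i == l.foldl (pvStepB d1 d2) (pvKey d1 d2 i)) = false := by
          simp
          intro h
          exact hkeq h.symm
        simp [hne, hkeq, hf]
    · simp only [hB, hlt, if_false, Bool.false_eq_true]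
      by_cases heq : pvKey d1 d2 i = b
      · simp only [heq, if_true, if_neg (by simp [hlt] : ¬ pvLtKey (pvKey d1 d2 i) b = true)]
        rw [ih (r ++ [i])]
        by_cases hbb : l.foldl (pvStepB d1 d2) b = b
        · simp [hbb]
        · have hf : (pvKey d1 d2 i == l.foldl (pvStepB d1 d2) b) = false := by
            simp [heq]
            intro h
            exact hbb h.symm
          have hbb2 : ¬ b = l.foldl (pvStepB d1 d2) b := fun h => hbb h.symm
          simp [hbb, hbb2]
      · simp only [heq, if_false]
        rw [ih r]
        have hf : (pvKey d1 d2 i == l.foldl (pvStepB d1 d2) b) = false := by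
          rcases foldB_le d1 d2 l b with h | h
          · rw [h]
            simpa using heq
          · simp
            intro hkb
            rw [← hkb] at h
            rw [ltKey_iff] at h
            rw [ltKey_iff] at hlt
            exact hlt h
        simp [hf]

-- ===== VERDICT (by name: the statement is the Claim_ definition above) =====
theorem find_min_mod_multicls_py_spec : Claim_equal_find_min_mod_multicls_py := by
  intro index_range modify_timess modifications _ _
  unfold Spec_find_min_mod_multicls_py find_min_mod_multicls_py find_min_mod_multicls_py_alt
  rw [show (index_range.foldl (fun b i => let k := pvKey modify_timess modifications i; if pvLtKey k b then k else b) ((10000000 : Int), (10000000 : Int))) = index_range.foldl (pvStepB modify_timess modifications) (10000000, 10000000) from rfl]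
  rw [foldA_eq]
  split <;> simp
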